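-- pv_equiv track=rewrite | github.com/pypi-data/pypi-mirror-369 | packages/rstbuddy/rstbuddy-0.3.1-py3-none-any.whl/build/lib/rstbuddy/services/rst_cleaner.py | _ensure_blank_line_after_code_blocks
-- ===== SOURCE A (Python) =====
-- def _ensure_blank_line_after_code_blocks(lines: list[str]) -> list[str]:
--     """
--     Ensure a blank line exists after every code-block directive.
--
--     Args:
--         lines: Input lines
--
--     Returns:
--         Updated lines
--
--     """
--     out: list[str] = []
--     i = 0
--     while i < len(lines):
--         out.append(lines[i])
--         if lines[i].lstrip().startswith(".. code-block::"):
--             # Ensure there's a blank line after this code-block directive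
--             if i + 1 < len(lines) and lines[i + 1].strip() != "":
--                 # Next line is not blank, so add a blank line
--                 out.append("")
--         i += 1
--     return out
-- ===== SOURCE B (Python) =====
-- def _ensure_blank_line_after_code_blocks(lines: list[str]) -> list[str]:
--     out = list(lines)
--     for i in range(len(lines) - 2, -1, -1):
--         if lines[i].lstrip().startswith(".. code-block::") and lines[i + 1].strip() != "":
--             out.insert(i + 1, "")
--     return out
-- ===== Notes on version B (the rewrite author's own statement) =====
-- stated objective: alternative
-- what changed: Instead of A's forward while-loop that rebuilds the output line by line (appending each line and peeking ahead after a directive), B copies the input once and walks the indices backwards, in-place inserting a blank line at i+1 after each code-block directive followed by a non-blank line; back-to-front insertion keeps the not-yet-visited indices valid. Constant-factor speedup: one bulk list(lines) copy plus a few inserts replaces n interpreted append iterations.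
import Mathlib
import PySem

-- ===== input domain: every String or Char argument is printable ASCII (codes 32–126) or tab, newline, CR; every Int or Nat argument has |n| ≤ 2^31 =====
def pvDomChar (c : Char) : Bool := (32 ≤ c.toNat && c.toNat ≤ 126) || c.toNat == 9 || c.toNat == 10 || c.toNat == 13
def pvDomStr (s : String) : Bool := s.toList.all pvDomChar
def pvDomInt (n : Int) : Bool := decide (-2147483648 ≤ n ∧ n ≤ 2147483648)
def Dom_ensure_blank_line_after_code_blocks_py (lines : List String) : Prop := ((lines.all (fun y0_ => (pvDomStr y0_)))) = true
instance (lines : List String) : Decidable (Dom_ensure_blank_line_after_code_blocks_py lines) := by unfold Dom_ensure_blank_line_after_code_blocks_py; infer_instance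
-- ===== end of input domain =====

-- B rewrites A's forward append-with-lookahead loop as: copy the input, then walk the
-- indices BACKWARDS inserting "" at i+1 after each directive followed by a non-blank line
-- (objective: alternative decomposition, same cost class).


-- shared between the two ports: 'line.lstrip().startswith(".. code-block::")'
def pyIsDirective (s : String) : Bool := PySem.Str.startswith (PySem.Str.lstrip s) ".. code-block::"

-- ===== PORT A =====
-- A: while-loop with index i; appends lines[i], and after a directive peeks at lines[i+1]
-- (ported as the obvious structural recursion: the head is lines[i], the tail head is lines[i+1]).
def aLoop : List String → List String
  | [] => []
  | x :: rest =>
      x :: (if pyIsDirective x && (match rest with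
                                   | y :: _ => PySem.Str.strip y != ""
                                   | [] => false) then
              "" :: aLoop rest
            else aLoop rest)

def ensure_blank_line_after_code_blocks_py (lines : List String) : List String := aLoop lines

-- ===== PORT B =====
-- B: out = list(lines); for i in range(len(lines)-2, -1, -1): if lines[i] is a directive
-- and lines[i+1].strip() != "": out.insert(i+1, "").  Indices here are always in range,
-- so lines[i] / lines[i+1] are ported with pyGetD (exact on in-range indices).
def bStep (lines : List String) (out : List String) (i : Int) : List String :=
  if pyIsDirective (PySem.List.pyGetD lines i "")
       && (PySem.Str.strip (PySem.List.pyGetD lines (i + 1) "") != "") then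
    PySem.List.insert out (i + 1) ""
  else out

def ensure_blank_line_after_code_blocks_py_alt (lines : List String) : List String :=
  (PySem.List.pyRange ((lines.length : Int) - 2) (-1) (-1)).foldl (bStep lines) lines

-- ===== PRECONDITION & SPEC =====
def Spec_ensure_blank_line_after_code_blocks_py (lines : List String) (out : List String) : Prop := out = ensure_blank_line_after_code_blocks_py_alt lines
instance (lines : List String) (out : List String) : Decidable (Spec_ensure_blank_line_after_code_blocks_py lines out) := by unfold Spec_ensure_blank_line_after_code_blocks_py; infer_instance

-- ===== CLAIM (what is proved, stated in full; the proofs are below) =====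
def Claim_equal_ensure_blank_line_after_code_blocks_py : Prop := ∀ (lines : List String), Dom_ensure_blank_line_after_code_blocks_py lines → Spec_ensure_blank_line_after_code_blocks_py lines (ensure_blank_line_after_code_blocks_py lines)

-- ===== LEMMAS AND PROOFS =====

-- bStep never shortens the accumulator (it only ever inserts)
theorem bStep_len_ge (lines out : List String) (i : Int) : out.length ≤ (bStep lines out i).length := by
  simp only [bStep]
  split_ifs
  · simp [PySem.List.length_insert]
  · exact le_refl _

theorem foldr_bStep_len_ge (lines : List String) (ks : List Nat) (out : List String) :
    out.length ≤ (ks.foldr (fun (k : Nat) acc => bStep lines acc (k : Int)) out).length := by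
  induction ks with
  | nil => exact le_refl _
  | cons k ks ih => exact le_trans ih (bStep_len_ge _ _ _)

-- shift lemma: one backward-insertion step on a cons cell, index moved down by one
theorem bStep_cons_shift (k : Nat) (x : String) (rest out : List String)
    (hk : k + 1 ≤ out.length) :
    bStep (x :: rest) (x :: out) ((k : Int) + 1) = x :: bStep rest out (k : Int) := by
  simp only [bStep]
  have h1 : PySem.List.pyGetD (x :: rest) ((k : Int) + 1) "" = PySem.List.pyGetD rest (k : Int) "" := by
    rw [show ((k : Int) + 1) = ((k + 1 : Nat) : Int) from by push_cast; ring,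
        PySem.List.pyGetD_natCast, PySem.List.pyGetD_natCast]
    simp
  have h2 : PySem.List.pyGetD (x :: rest) ((k : Int) + 1 + 1) "" = PySem.List.pyGetD rest ((k : Int) + 1) "" := by
    rw [show ((k : Int) + 1 + 1) = ((k + 2 : Nat) : Int) from by push_cast; ring,
        show ((k : Int) + 1) = ((k + 1 : Nat) : Int) from by push_cast; ring,
        PySem.List.pyGetD_natCast, PySem.List.pyGetD_natCast]
    simp
  rw [h1, h2]
  split_ifs with h
  · rw [show ((k : Int) + 1 + 1) = ((k + 2 : Nat) : Int) from by push_cast; ring,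
        show ((k : Int) + 1) = ((k + 1 : Nat) : Int) from by push_cast; ring,
        PySem.List.insert_natCast _ _ _ (by simpa using Nat.succ_le_succ hk),
        PySem.List.insert_natCast _ _ _ hk]
    simp
  · rfl

-- folding the shifted steps over any in-range index list commutes with cons
theorem foldr_bStep_cons (ks : List Nat) (x : String) (rest out : List String)
    (hks : ∀ k ∈ ks, k + 1 ≤ out.length) :
    ks.foldr (fun (k : Nat) acc => bStep (x :: rest) acc ((k : Int) + 1)) (x :: out)
      = x :: ks.foldr (fun (k : Nat) acc => bStep rest acc (k : Int)) out := by
  induction ks with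
  | nil => rfl
  | cons k ks ih =>
      simp only [List.foldr_cons]
      rw [ih (fun j hj => hks j (List.mem_cons_of_mem _ hj))]
      exact bStep_cons_shift k x rest _
        (le_trans (hks k (List.mem_cons_self)) (foldr_bStep_len_ge rest ks out))

-- the backward fold over all indices computes exactly A's forward loop
theorem foldr_range_eq_aLoop : ∀ (lines : List String),
    (List.range (lines.length - 1)).foldr (fun (k : Nat) acc => bStep lines acc (k : Int)) lines
      = aLoop lines
  | [] => by simp [aLoop]
  | [x] => by simp [aLoop]
  | x :: y :: r => by
      have ih := foldr_range_eq_aLoop (y :: r)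
      have hlen : (x :: y :: r).length - 1 = r.length + 1 := rfl
      rw [hlen, List.range_succ_eq_map, List.foldr_cons, List.foldr_map]
      rw [show (fun (k : Nat) (acc : List String) => bStep (x :: y :: r) acc ((k + 1 : Nat) : Int))
            = (fun (k : Nat) (acc : List String) => bStep (x :: y :: r) acc ((k : Int) + 1)) from by
            funext k acc; norm_num]
      rw [foldr_bStep_cons (List.range r.length) x (y :: r) (y :: r)
            (fun k hk => by
              have := List.mem_range.mp hk
              simp only [List.length_cons]; omega)]
      rw [show r.length = (y :: r).length - 1 from rfl, ih]
      show bStep (x :: y :: r) (x :: aLoop (y :: r)) ((0 : Nat) : Int) = aLoop (x :: y :: r)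
      conv_rhs => rw [aLoop]
      simp only [bStep]
      rw [show PySem.List.pyGetD (x :: y :: r) ((0 : Nat) : Int) "" = x from by
            rw [PySem.List.pyGetD_natCast]; rfl,
          show PySem.List.pyGetD (x :: y :: r) (((0 : Nat) : Int) + 1) "" = y from by
            rw [show (((0 : Nat) : Int) + 1) = ((1 : Nat) : Int) from by norm_num,
                PySem.List.pyGetD_natCast]; rfl]
      by_cases h : (pyIsDirective x && (PySem.Str.strip y != "")) = true
      · rw [if_pos h, if_pos h,
            show (((0 : Nat) : Int) + 1) = ((1 : Nat) : Int) from by norm_num,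
            PySem.List.insert_natCast _ _ _ (by simp)]
        simp
      · rw [if_neg h, if_neg h]

-- ===== VERDICT (by name: the statement is the Claim_ definition above) =====
theorem ensure_blank_line_after_code_blocks_py_spec : Claim_equal_ensure_blank_line_after_code_blocks_py := by
  intro lines _
  show ensure_blank_line_after_code_blocks_py lines = ensure_blank_line_after_code_blocks_py_alt lines
  rw [ensure_blank_line_after_code_blocks_py, ensure_blank_line_after_code_blocks_py_alt,
      PySem.List.pyRange_neg_one_eq_reverse, List.foldl_reverse]
  cases lines with
  | nil => rfl
  | cons x rest =>
      rw [show ((-1 : Int) + 1) = (0 : Int) from by norm_num,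
          show ((((x :: rest).length : Int) - 2) + 1) = (((x :: rest).length - 1 : Nat) : Int) from by
            simp only [List.length_cons]; push_cast; omega,
          PySem.List.pyRange_one]
      simp only [sub_zero, Int.toNat_natCast, zero_add]
      rw [List.foldr_map]
      exact (foldr_range_eq_aLoop (x :: rest)).symm
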